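-- pv_equiv track=rewrite | github.com/marccarre/google-code-jam | cj2020/r1a/pattern_matching.py | min_word
-- ===== SOURCE A (Python) =====
-- from typing import List
--
-- def min_word(patterns: List[str]) -> str:
--     if all(p.count('*') == 1 for p in patterns):
--         if all(p.startswith('*') for p in patterns):
--             patterns = [p[1:] for p in patterns]
--             longuest = max(patterns, key=len)
--             return longuest if all(longuest.endswith(p) for p in patterns) else '*'
--         else:
--             patterns = [p.split('*') for p in patterns]
--             bs, es = list(zip(*patterns))
--             max_b = max(bs, key=len)
--             if not all(max_b.startswith(b) for b in bs):
--                 return '*'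
--             max_e = max(es, key=len)
--             return max_b + max_e if all(max_e.endswith(e) for e in es) else '*'
--     # TODO: Case 3.
--     return '*'
-- ===== SOURCE B (Python) =====
-- def min_word(patterns):
--     cur_b = cur_e = ''
--     for p in patterns:
--         parts = p.split('*')
--         if len(parts) != 2:
--             return '*'
--         b, e = parts
--         if b.startswith(cur_b):
--             cur_b = b
--         elif not cur_b.startswith(b):
--             return '*'
--         if e.endswith(cur_e):
--             cur_e = e
--         elif not cur_e.endswith(e):
--             return '*'
--     return cur_b + cur_e
-- ===== Notes on version B (the rewrite author's own statement) =====
-- stated objective: alternative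
-- what changed: A filters with several whole-list passes (count-check pass, startswith pass or zip/split passes, max-by-len, prefix pass, max-by-len, suffix pass, plus a special branch for all-'*'-prefixed patterns); B is a single left-to-right loop that splits each pattern once and keeps the longest begin/end seen so far, returning '*' on the first incomparable part.
import Mathlib
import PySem

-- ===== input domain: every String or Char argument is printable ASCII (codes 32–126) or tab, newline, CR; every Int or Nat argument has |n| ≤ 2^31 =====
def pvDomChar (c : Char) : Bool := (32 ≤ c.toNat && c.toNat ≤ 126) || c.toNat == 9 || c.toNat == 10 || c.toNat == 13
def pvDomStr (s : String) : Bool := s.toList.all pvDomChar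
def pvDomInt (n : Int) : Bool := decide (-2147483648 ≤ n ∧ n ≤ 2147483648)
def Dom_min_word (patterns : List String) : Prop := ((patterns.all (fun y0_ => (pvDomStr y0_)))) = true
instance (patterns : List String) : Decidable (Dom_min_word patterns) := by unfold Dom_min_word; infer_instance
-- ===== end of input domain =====

-- B replaces A's per-side max/all passes (and A's special all-'*'-prefixed branch) by a single
-- left-to-right loop keeping the longest begin/end seen so far; equivalence proved on non-empty input.

-- ===== PORT A =====
def min_word (patterns : List String) : String :=
  if patterns.all (fun p => PySem.Str.count p "*" == 1) then
    if patterns.all (fun p => PySem.Str.startswith p "*") then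
      -- patterns = [p[1:] for p in patterns]
      let patterns' := patterns.map (fun p => PySem.Str.slice p (some 1) none)
      -- longuest = max(patterns, key=len); max([]) raises ValueError — Pre_ excludes that input
      match PySem.List.max? patterns' PySem.Str.len with
      | none => "*"
      | some longuest =>
        if patterns'.all (fun p => PySem.Str.endswith longuest p) then longuest else "*"
    else
      -- patterns = [p.split('*') for p in patterns]; bs, es = list(zip(*patterns))
      -- exact here: the outer guard gives every split exactly 2 parts, so zip(*…) yields the two columns
      let parts := patterns.map (fun p => ((PySem.Str.split? p "*").getD []))
      let bs := parts.map (fun q => q.getD 0 "")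
      let es := parts.map (fun q => q.getD 1 "")
      match PySem.List.max? bs PySem.Str.len with
      | none => "*"   -- unreachable: this branch implies patterns ≠ []
      | some max_b =>
        if !(bs.all (fun b => PySem.Str.startswith max_b b)) then "*"
        else
          match PySem.List.max? es PySem.Str.len with
          | none => "*"
          | some max_e =>
            if es.all (fun e => PySem.Str.endswith max_e e) then max_b ++ max_e else "*"
  else "*"

-- ===== PORT B =====
def minWordLoop : List String → String → String → String
  | [], cur_b, cur_e => cur_b ++ cur_e
  | p :: ps, cur_b, cur_e =>
    match (PySem.Str.split? p "*").getD [] with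
    | [b, e] =>
      if PySem.Str.startswith b cur_b then
        if PySem.Str.endswith e cur_e then minWordLoop ps b e
        else if PySem.Str.endswith cur_e e then minWordLoop ps b cur_e
        else "*"
      else if PySem.Str.startswith cur_b b then
        if PySem.Str.endswith e cur_e then minWordLoop ps cur_b e
        else if PySem.Str.endswith cur_e e then minWordLoop ps cur_b cur_e
        else "*"
      else "*"
    | _ => "*"

def min_word_alt (patterns : List String) : String := minWordLoop patterns "" ""

-- ===== PRECONDITION & SPEC =====
-- Pre_ excludes only the empty list, on which A raises ValueError (max() of an empty sequence).
def Pre_min_word (patterns : List String) : Prop := patterns ≠ []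
instance (patterns : List String) : Decidable (Pre_min_word patterns) := by unfold Pre_min_word; infer_instance
def pvWitness_min_word : List String := ["a*b", "*b"]

def Spec_min_word (patterns : List String) (out : String) : Prop := out = min_word_alt patterns
instance (patterns : List String) (out : String) : Decidable (Spec_min_word patterns out) := by unfold Spec_min_word; infer_instance

-- ===== CLAIM (what is proved, stated in full; the proofs are below) =====
def Claim_equal_min_word : Prop := ∀ (patterns : List String), Dom_min_word patterns → Pre_min_word patterns → Spec_min_word patterns (min_word patterns)

-- ===== LEMMAS AND PROOFS =====

-- structural reference form of p.split('*') (single-character separator)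
def pvSplit : List Char → List (List Char)
  | [] => [[]]
  | c :: rest => if c = '*' then [] :: pvSplit rest else (pvSplit rest).modifyHead (c :: ·)

theorem pvSplit_ne_nil (cs : List Char) : pvSplit cs ≠ [] := by
  induction cs with
  | nil => simp [pvSplit]
  | cons c rest ih =>
    simp only [pvSplit]
    split
    · simp
    · cases h : pvSplit rest with
      | nil => exact absurd h ih
      | cons a t => simp

theorem go_split_star (l : List Char) : ∀ (fuel : Nat) (cur : List Char) (acc : List (List Char)),
    l.length ≤ fuel →
    PySem.Chars.splitOn.go ['*'] fuel l cur acc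
      = acc.reverse ++ (pvSplit l).modifyHead (cur.reverse ++ ·) := by
  induction l with
  | nil =>
    intro fuel cur acc _
    cases fuel <;> simp [PySem.Chars.splitOn.go, pvSplit]
  | cons c rest ih =>
    intro fuel cur acc h
    cases fuel with
    | zero => simp at h
    | succ f =>
      simp only [PySem.Chars.splitOn.go]
      by_cases hc : c = '*'
      · subst hc
        rw [if_pos (by simp [List.isPrefixOf])]
        have hd : List.drop ['*'].length ('*' :: rest) = rest := rfl
        rw [hd, ih f [] (cur.reverse :: acc) (by simp at h; omega)]
        simp only [pvSplit]
        cases hrr : pvSplit rest <;> simp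
      · rw [if_neg (by simp [List.isPrefixOf]; exact fun hh => hc hh.symm)]
        rw [ih f (c :: cur) acc (by simp at h; omega)]
        simp only [pvSplit, if_neg hc]
        cases hr : pvSplit rest with
        | nil => exact absurd hr (pvSplit_ne_nil rest)
        | cons a t => simp

theorem splitOn_star (cs : List Char) : PySem.Chars.splitOn cs ['*'] = pvSplit cs := by
  have h := go_split_star cs (cs.length + 1) [] [] (by omega)
  rw [PySem.Chars.splitOn, h]
  cases hr : pvSplit cs with
  | nil => exact absurd hr (pvSplit_ne_nil cs)
  | cons a t => simp

theorem go_count_star (l : List Char) : ∀ (fuel : Nat) (acc : Nat),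
    l.length ≤ fuel →
    PySem.Chars.count.go ['*'] fuel l acc = acc + l.count '*' := by
  induction l with
  | nil =>
    intro fuel acc _
    cases fuel <;> simp [PySem.Chars.count.go]
  | cons c rest ih =>
    intro fuel acc h
    cases fuel with
    | zero => simp at h
    | succ f =>
      simp only [PySem.Chars.count.go]
      by_cases hc : c = '*'
      · subst hc
        rw [if_pos (by simp [List.isPrefixOf])]
        have hd : List.drop ['*'].length ('*' :: rest) = rest := rfl
        rw [hd, ih f (acc + 1) (by simp at h; omega)]
        simp
        omega
      · rw [if_neg (by simp [List.isPrefixOf]; exact fun hh => hc hh.symm)]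
        rw [ih f acc (by simp at h; omega)]
        simp [hc]

theorem count_star (cs : List Char) : PySem.Chars.count cs ['*'] = cs.count '*' := by
  have h := go_count_star cs cs.length 0 (by omega)
  simpa [PySem.Chars.count] using h

theorem length_pvSplit (cs : List Char) : (pvSplit cs).length = cs.count '*' + 1 := by
  induction cs with
  | nil => simp [pvSplit]
  | cons c rest ih =>
    simp only [pvSplit]
    split
    · rename_i hc
      simp [hc, ih]
    · rename_i hc
      cases h : pvSplit rest with
      | nil => exact absurd h (pvSplit_ne_nil rest)
      | cons a t =>
        rw [h] at ih
        simp [hc]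
        simp at ih
        omega

theorem pvSplit_single {cs x : List Char} (h : pvSplit cs = [x]) : x = cs := by
  induction cs generalizing x with
  | nil => simp [pvSplit] at h; simp [h]
  | cons c rest ih =>
    simp only [pvSplit] at h
    split at h
    · rename_i hc
      simp at h
      exact absurd h.2 (pvSplit_ne_nil rest)
    · rename_i hc
      cases hr : pvSplit rest with
      | nil => exact absurd hr (pvSplit_ne_nil rest)
      | cons a t =>
        rw [hr] at h
        simp at h
        obtain ⟨hx, ht⟩ := h
        subst ht
        have ha := ih (x := a) (by rw [hr])
        subst ha
        simp [hx]

-- parsing a pattern into its (begin, end) pair, as B reads it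
def pvTwo (p : String) : Option (String × String) :=
  match (PySem.Str.split? p "*").getD [] with
  | [b, e] => some (b, e)
  | _ => none

theorem parts_eq (p : String) : (PySem.Str.split? p "*").getD [] = (pvSplit p.toList).map String.ofList := by
  simp [PySem.Str.split?, PySem.Chars.split?, splitOn_star]

theorem count_toList (p : String) : PySem.Str.count p "*" = p.toList.count '*' := by
  rw [PySem.Str.count_eq]
  exact count_star _

theorem pvTwo_eq_none_iff (p : String) : pvTwo p = none ↔ ¬ (PySem.Str.count p "*" = 1) := by
  have hl : ((PySem.Str.split? p "*").getD []).length = p.toList.count '*' + 1 := by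
    rw [parts_eq]; simp [length_pvSplit]
  rw [count_toList]
  unfold pvTwo
  rcases h : (PySem.Str.split? p "*").getD [] with _ | ⟨a, _ | ⟨b, _ | ⟨c, t⟩⟩⟩
  · rw [h] at hl
    simp at hl
  · rw [h] at hl
    simp at hl
    simp
    omega
  · rw [h] at hl
    simp at hl
    simp
    omega
  · rw [h] at hl
    simp at hl
    simp
    omega

theorem pvTwo_eq_some_iff (p : String) (b e : String) :
    pvTwo p = some (b, e) ↔ (PySem.Str.split? p "*").getD [] = [b, e] := by
  unfold pvTwo
  rcases h : (PySem.Str.split? p "*").getD [] with _ | ⟨a, _ | ⟨a2, _ | ⟨a3, t3⟩⟩⟩ <;> simp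

-- prefix/suffix orders on strings, chains, and maxima
def pvPre (a b : String) : Prop := a.toList <+: b.toList
def pvSuf (a b : String) : Prop := a.toList <:+ b.toList
def pvChainP (xs : List String) : Prop := ∀ a ∈ xs, ∀ b ∈ xs, pvPre a b ∨ pvPre b a
def pvChainS (xs : List String) : Prop := ∀ a ∈ xs, ∀ b ∈ xs, pvSuf a b ∨ pvSuf b a
def pvMaxP (xs : List String) (m : String) : Prop := m ∈ xs ∧ ∀ a ∈ xs, pvPre a m
def pvMaxS (xs : List String) (m : String) : Prop := m ∈ xs ∧ ∀ a ∈ xs, pvSuf a m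

theorem pvPre_antisymm {a b : String} (h1 : pvPre a b) (h2 : pvPre b a) : a = b :=
  String.toList_inj.mp (h1.eq_of_length_le h2.length_le)

theorem pvSuf_antisymm {a b : String} (h1 : pvSuf a b) (h2 : pvSuf b a) : a = b :=
  String.toList_inj.mp (h1.eq_of_length_le h2.length_le)

theorem startswith_iff_pvPre (a b : String) : PySem.Str.startswith a b = true ↔ pvPre b a := by
  simp [PySem.Str.startswith_eq, PySem.Chars.startswith_iff, pvPre]

theorem endswith_iff_pvSuf (a b : String) : PySem.Str.endswith a b = true ↔ pvSuf b a := by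
  simp [PySem.Str.endswith_eq, PySem.Chars.endswith_iff, pvSuf]

theorem max?_of_pvMaxP {xs : List String} {m : String} (h : pvMaxP xs m) :
    PySem.List.max? xs PySem.Str.len = some m := by
  obtain ⟨hm, hall⟩ := h
  cases hmax : PySem.List.max? xs PySem.Str.len with
  | none =>
    rw [PySem.List.max?_eq_none_iff] at hmax
    subst hmax
    simp at hm
  | some m' =>
    have h1 : m' ∈ xs := PySem.List.max?_mem hmax
    have h2 : PySem.Str.len m ≤ PySem.Str.len m' := PySem.List.max?_isMax hmax m hm
    have h3 : pvPre m' m := hall m' h1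
    have h4 : m.toList.length ≤ m'.toList.length := by
      simp [PySem.Str.len_eq] at h2
      exact_mod_cast h2
    rw [String.toList_inj.mp (h3.eq_of_length_le h4)]

-- all elements of a chain are below its first-longest element
theorem chainP_all_pre_max {xs : List String} {m : String}
    (hchain : pvChainP xs) (hmax : PySem.List.max? xs PySem.Str.len = some m) :
    ∀ b ∈ xs, pvPre b m := by
  intro b hb
  have hm : m ∈ xs := PySem.List.max?_mem hmax
  have hlen : PySem.Str.len b ≤ PySem.Str.len m := PySem.List.max?_isMax hmax b hb
  have hlen' : b.toList.length ≤ m.toList.length := by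
    simp [PySem.Str.len_eq] at hlen
    exact_mod_cast hlen
  rcases hchain b hb m hm with h | h
  · exact h
  · rw [pvPre] at h ⊢
    rw [h.eq_of_length_le hlen']

theorem chainS_all_suf_max {xs : List String} {m : String}
    (hchain : pvChainS xs) (hmax : PySem.List.max? xs PySem.Str.len = some m) :
    ∀ e ∈ xs, pvSuf e m := by
  intro b hb
  have hm : m ∈ xs := PySem.List.max?_mem hmax
  have hlen : PySem.Str.len b ≤ PySem.Str.len m := PySem.List.max?_isMax hmax b hb
  have hlen' : b.toList.length ≤ m.toList.length := by
    simp [PySem.Str.len_eq] at hlen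
    exact_mod_cast hlen
  rcases hchain b hb m hm with h | h
  · exact h
  · rw [pvSuf] at h ⊢
    rw [h.eq_of_length_le hlen']

-- moving the running maximum across one step of the loop
theorem pvMaxP_swap {cb b m : String} {l : List String}
    (h : pvMaxP (cb :: b :: l) m) (hcb : pvPre cb b) : pvMaxP (b :: l) m := by
  obtain ⟨hm, hall⟩ := h
  refine ⟨?_, fun a ha => hall a (by simp at ha ⊢; tauto)⟩
  rcases (by simpa using hm : m = cb ∨ m = b ∨ m ∈ l) with rfl | rfl | h'
  · have hb : b = m := pvPre_antisymm (hall b (by simp)) hcb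
    rw [← hb]
    simp
  · simp
  · simp [h']

theorem pvMaxP_keep {cb b m : String} {l : List String}
    (h : pvMaxP (cb :: b :: l) m) (hb : pvPre b cb) : pvMaxP (cb :: l) m := by
  obtain ⟨hm, hall⟩ := h
  refine ⟨?_, fun a ha => hall a (by simp at ha ⊢; tauto)⟩
  rcases (by simpa using hm : m = cb ∨ m = b ∨ m ∈ l) with rfl | rfl | h'
  · simp
  · have hc : cb = m := pvPre_antisymm (hall cb (by simp)) hb
    rw [← hc]
    simp
  · simp [h']

theorem pvMaxS_swap {ce e m : String} {l : List String}
    (h : pvMaxS (ce :: e :: l) m) (hce : pvSuf ce e) : pvMaxS (e :: l) m := by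
  obtain ⟨hm, hall⟩ := h
  refine ⟨?_, fun a ha => hall a (by simp at ha ⊢; tauto)⟩
  rcases (by simpa using hm : m = ce ∨ m = e ∨ m ∈ l) with rfl | rfl | h'
  · have hb : e = m := pvSuf_antisymm (hall e (by simp)) hce
    rw [← hb]
    simp
  · simp
  · simp [h']

theorem pvMaxS_keep {ce e m : String} {l : List String}
    (h : pvMaxS (ce :: e :: l) m) (he : pvSuf e ce) : pvMaxS (ce :: l) m := by
  obtain ⟨hm, hall⟩ := h
  refine ⟨?_, fun a ha => hall a (by simp at ha ⊢; tauto)⟩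
  rcases (by simpa using hm : m = ce ∨ m = e ∨ m ∈ l) with rfl | rfl | h'
  · simp
  · have hc : ce = m := pvSuf_antisymm (hall ce (by simp)) he
    rw [← hc]
    simp
  · simp [h']

-- extending a chain across one step of the loop (used contrapositively for failure)
theorem pvChainP_cons {cb : String} {L : List String}
    (h : pvChainP L) (key : ∀ x ∈ L, pvPre cb x ∨ pvPre x cb) : pvChainP (cb :: L) := by
  intro x hx y hy
  rcases List.mem_cons.mp hx with hx' | hx'
  · subst hx'
    rcases List.mem_cons.mp hy with hy' | hy'
    · subst hy'
      exact Or.inl (List.prefix_refl _)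
    · exact key y hy'
  · rcases List.mem_cons.mp hy with hy' | hy'
    · subst hy'
      exact (key x hx').symm
    · exact h x hx' y hy' 

theorem pvChainS_cons {ce : String} {L : List String}
    (h : pvChainS L) (key : ∀ x ∈ L, pvSuf ce x ∨ pvSuf x ce) : pvChainS (ce :: L) := by
  intro x hx y hy
  rcases List.mem_cons.mp hx with hx' | hx'
  · subst hx'
    rcases List.mem_cons.mp hy with hy' | hy'
    · subst hy'
      exact Or.inl (List.suffix_refl _)
    · exact key y hy'
  · rcases List.mem_cons.mp hy with hy' | hy'
    · subst hy'
      exact (key x hx').symm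
    · exact h x hx' y hy' 

theorem pvChainP_perm2 {a b : String} {l : List String}
    (h : pvChainP (a :: b :: l)) : pvChainP (b :: a :: l) :=
  fun x hx y hy => h x (by simp at hx ⊢; tauto) y (by simp at hy ⊢; tauto)

theorem pvChainS_perm2 {a b : String} {l : List String}
    (h : pvChainS (a :: b :: l)) : pvChainS (b :: a :: l) :=
  fun x hx y hy => h x (by simp at hx ⊢; tauto) y (by simp at hy ⊢; tauto)

theorem pvChainP_cons_of_pre {cb b : String} {l : List String}
    (h : pvChainP (b :: l)) (hcb : pvPre cb b) : pvChainP (cb :: b :: l) := by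
  refine pvChainP_cons h fun x hx => ?_
  rcases List.mem_cons.mp hx with rfl | hx'
  · exact Or.inl hcb
  · rcases h b (by simp) x (by simp [hx']) with hbx | hxb
    · exact Or.inl (hcb.trans hbx)
    · exact List.prefix_or_prefix_of_prefix hcb hxb

theorem pvChainP_cons_of_pre' {cb b : String} {l : List String}
    (h : pvChainP (cb :: l)) (hb : pvPre b cb) : pvChainP (cb :: b :: l) := by
  refine pvChainP_perm2 (pvChainP_cons h fun x hx => ?_)
  rcases List.mem_cons.mp hx with rfl | hx'
  · exact Or.inl hb
  · rcases h cb (by simp) x (by simp [hx']) with hcx | hxc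
    · exact Or.inl (hb.trans hcx)
    · exact List.prefix_or_prefix_of_prefix hb hxc

theorem pvChainS_cons_of_suf {ce e : String} {l : List String}
    (h : pvChainS (e :: l)) (hce : pvSuf ce e) : pvChainS (ce :: e :: l) := by
  refine pvChainS_cons h fun x hx => ?_
  rcases List.mem_cons.mp hx with rfl | hx'
  · exact Or.inl hce
  · rcases h e (by simp) x (by simp [hx']) with hex | hxe
    · exact Or.inl (hce.trans hex)
    · exact List.suffix_or_suffix_of_suffix hce hxe

theorem pvChainS_cons_of_suf' {ce e : String} {l : List String}
    (h : pvChainS (ce :: l)) (he : pvSuf e ce) : pvChainS (ce :: e :: l) := by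
  refine pvChainS_perm2 (pvChainS_cons h fun x hx => ?_)
  rcases List.mem_cons.mp hx with rfl | hx'
  · exact Or.inl he
  · rcases h ce (by simp) x (by simp [hx']) with hcx | hxc
    · exact Or.inl (he.trans hcx)
    · exact List.suffix_or_suffix_of_suffix he hxc

-- the parsed begin/end columns
def pvBs (ps : List String) : List String := ps.map (fun p => ((pvTwo p).getD ("", "")).1)
def pvEs (ps : List String) : List String := ps.map (fun p => ((pvTwo p).getD ("", "")).2)
def pvOk (ps : List String) : Prop := ∀ p ∈ ps, pvTwo p ≠ none

theorem loop_succ : ∀ (ps : List String) (cb ce mb me : String),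
    pvOk ps → pvMaxP (cb :: pvBs ps) mb → pvMaxS (ce :: pvEs ps) me →
    minWordLoop ps cb ce = mb ++ me := by
  intro ps
  induction ps with
  | nil =>
    intro cb ce mb me _ hb he
    have hmb : mb = cb := by simpa [pvBs] using hb.1
    have hme : me = ce := by simpa [pvEs] using he.1
    simp [minWordLoop, hmb, hme]
  | cons p ps ih =>
    intro cb ce mb me hok hb he
    obtain ⟨⟨b, e⟩, hpe⟩ := Option.ne_none_iff_exists'.mp (hok p (by simp))
    have hparts : (PySem.Str.split? p "*").getD [] = [b, e] := (pvTwo_eq_some_iff p b e).mp hpe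
    have hbs : pvBs (p :: ps) = b :: pvBs ps := by simp [pvBs, hpe]
    have hes : pvEs (p :: ps) = e :: pvEs ps := by simp [pvEs, hpe]
    rw [hbs] at hb
    rw [hes] at he
    have hok' : pvOk ps := fun q hq => hok q (by simp [hq])
    have hcomp := List.prefix_or_prefix_of_prefix (hb.2 cb (by simp)) (hb.2 b (by simp))
    have hcome := List.suffix_or_suffix_of_suffix (he.2 ce (by simp)) (he.2 e (by simp))
    simp only [minWordLoop, hparts]
    by_cases h1 : PySem.Str.startswith b cb = true
    · have hcb : pvPre cb b := (startswith_iff_pvPre b cb).mp h1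
      have hb' := pvMaxP_swap hb hcb
      rw [if_pos h1]
      by_cases h2 : PySem.Str.endswith e ce = true
      · rw [if_pos h2]
        exact ih b e mb me hok' hb' (pvMaxS_swap he ((endswith_iff_pvSuf e ce).mp h2))
      · rw [if_neg h2]
        have h3 : PySem.Str.endswith ce e = true := by
          rcases hcome with hce | hec
          · exact absurd ((endswith_iff_pvSuf e ce).mpr hce) h2
          · exact (endswith_iff_pvSuf ce e).mpr hec
        rw [if_pos h3]
        exact ih b ce mb me hok' hb' (pvMaxS_keep he ((endswith_iff_pvSuf ce e).mp h3))
    · rw [if_neg h1]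
      have h1' : PySem.Str.startswith cb b = true := by
        rcases hcomp with hcb | hbc
        · exact absurd ((startswith_iff_pvPre b cb).mpr hcb) h1
        · exact (startswith_iff_pvPre cb b).mpr hbc
      rw [if_pos h1']
      have hb' := pvMaxP_keep hb ((startswith_iff_pvPre cb b).mp h1')
      by_cases h2 : PySem.Str.endswith e ce = true
      · rw [if_pos h2]
        exact ih cb e mb me hok' hb' (pvMaxS_swap he ((endswith_iff_pvSuf e ce).mp h2))
      · rw [if_neg h2]
        have h3 : PySem.Str.endswith ce e = true := by
          rcases hcome with hce | hec
          · exact absurd ((endswith_iff_pvSuf e ce).mpr hce) h2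
          · exact (endswith_iff_pvSuf ce e).mpr hec
        rw [if_pos h3]
        exact ih cb ce mb me hok' hb' (pvMaxS_keep he ((endswith_iff_pvSuf ce e).mp h3))

theorem loop_fail : ∀ (ps : List String) (cb ce : String),
    ¬ (pvOk ps ∧ pvChainP (cb :: pvBs ps) ∧ pvChainS (ce :: pvEs ps)) →
    minWordLoop ps cb ce = "*" := by
  intro ps
  induction ps with
  | nil =>
    intro cb ce h
    exfalso
    refine h ⟨fun p hp => absurd hp (List.not_mem_nil), ?_, ?_⟩
    · intro a ha b hb
      simp [pvBs] at ha hb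
      subst ha; subst hb
      exact Or.inl (List.prefix_refl _)
    · intro a ha b hb
      simp [pvEs] at ha hb
      subst ha; subst hb
      exact Or.inl (List.suffix_refl _)
  | cons p ps ih =>
    intro cb ce h
    cases hpe : pvTwo p with
    | none =>
      have hsh := hpe
      unfold pvTwo at hsh
      rcases hq : (PySem.Str.split? p "*").getD [] with _ | ⟨a, _ | ⟨a2, _ | ⟨a3, t3⟩⟩⟩ <;>
        rw [hq] at hsh <;> simp at hsh <;> simp [minWordLoop, hq]
    | some be =>
      obtain ⟨b, e⟩ := be
      have hparts : (PySem.Str.split? p "*").getD [] = [b, e] := (pvTwo_eq_some_iff p b e).mp hpe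
      have hbs : pvBs (p :: ps) = b :: pvBs ps := by simp [pvBs, hpe]
      have hes : pvEs (p :: ps) = e :: pvEs ps := by simp [pvEs, hpe]
      have hokc : pvOk ps → pvOk (p :: ps) := by
        intro hok q hq
        rcases List.mem_cons.mp hq with rfl | hq'
        · simp [hpe]
        · exact hok q hq'
      simp only [minWordLoop, hparts]
      by_cases h1 : PySem.Str.startswith b cb = true
      · have hcb : pvPre cb b := (startswith_iff_pvPre b cb).mp h1
        rw [if_pos h1]
        by_cases h2 : PySem.Str.endswith e ce = true
        · rw [if_pos h2]
          apply ih
          rintro ⟨hok', hcp, hcs⟩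
          exact h ⟨hokc hok', by rw [hbs]; exact pvChainP_cons_of_pre hcp hcb,
            by rw [hes]; exact pvChainS_cons_of_suf hcs ((endswith_iff_pvSuf e ce).mp h2)⟩
        · rw [if_neg h2]
          by_cases h3 : PySem.Str.endswith ce e = true
          · rw [if_pos h3]
            apply ih
            rintro ⟨hok', hcp, hcs⟩
            exact h ⟨hokc hok', by rw [hbs]; exact pvChainP_cons_of_pre hcp hcb,
              by rw [hes]; exact pvChainS_cons_of_suf' hcs ((endswith_iff_pvSuf ce e).mp h3)⟩
          · rw [if_neg h3]
      · rw [if_neg h1]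
        by_cases h1' : PySem.Str.startswith cb b = true
        · have hbc : pvPre b cb := (startswith_iff_pvPre cb b).mp h1'
          rw [if_pos h1']
          by_cases h2 : PySem.Str.endswith e ce = true
          · rw [if_pos h2]
            apply ih
            rintro ⟨hok', hcp, hcs⟩
            exact h ⟨hokc hok', by rw [hbs]; exact pvChainP_cons_of_pre' hcp hbc,
              by rw [hes]; exact pvChainS_cons_of_suf hcs ((endswith_iff_pvSuf e ce).mp h2)⟩
          · rw [if_neg h2]
            by_cases h3 : PySem.Str.endswith ce e = true
            · rw [if_pos h3]
              apply ih
              rintro ⟨hok', hcp, hcs⟩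
              exact h ⟨hokc hok', by rw [hbs]; exact pvChainP_cons_of_pre' hcp hbc,
                by rw [hes]; exact pvChainS_cons_of_suf' hcs ((endswith_iff_pvSuf ce e).mp h3)⟩
            · rw [if_neg h3]
        · rw [if_neg h1']

-- B, expressed in the shape of A's general branch
theorem loop_general (patterns : List String) (hne : patterns ≠ []) (hok : pvOk patterns) :
    minWordLoop patterns "" ""
      = (match PySem.List.max? (pvBs patterns) PySem.Str.len with
        | none => "*"
        | some max_b =>
          if !((pvBs patterns).all (fun b => PySem.Str.startswith max_b b)) then "*"
          else
            match PySem.List.max? (pvEs patterns) PySem.Str.len with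
            | none => "*"
            | some max_e =>
              if (pvEs patterns).all (fun e => PySem.Str.endswith max_e e) then max_b ++ max_e
              else "*") := by
  have hBs_ne : pvBs patterns ≠ [] := by simp [pvBs, hne]
  have hEs_ne : pvEs patterns ≠ [] := by simp [pvEs, hne]
  cases hmb : PySem.List.max? (pvBs patterns) PySem.Str.len with
  | none => exact absurd ((PySem.List.max?_eq_none_iff _ _).mp hmb) hBs_ne
  | some mb =>
    by_cases hall : ((pvBs patterns).all (fun b => PySem.Str.startswith mb b)) = true
    · cases hme : PySem.List.max? (pvEs patterns) PySem.Str.len with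
      | none => exact absurd ((PySem.List.max?_eq_none_iff _ _).mp hme) hEs_ne
      | some me =>
        have hmbP : pvMaxP ("" :: pvBs patterns) mb := by
          refine ⟨by simp [PySem.List.max?_mem hmb], ?_⟩
          intro a ha
          rcases List.mem_cons.mp ha with rfl | ha'
          · exact List.nil_prefix
          · exact (startswith_iff_pvPre mb a).mp (by simpa using (List.all_eq_true.mp hall) a ha')
        by_cases halle : ((pvEs patterns).all (fun e => PySem.Str.endswith me e)) = true
        · have hmeS : pvMaxS ("" :: pvEs patterns) me := by
            refine ⟨by simp [PySem.List.max?_mem hme], ?_⟩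
            intro a ha
            rcases List.mem_cons.mp ha with rfl | ha'
            · exact List.nil_suffix
            · exact (endswith_iff_pvSuf me a).mp (by simpa using (List.all_eq_true.mp halle) a ha')
          rw [loop_succ patterns "" "" mb me hok hmbP hmeS]
          have hred : (if (!((pvBs patterns).all fun b => PySem.Str.startswith mb b)) = true then "*"
              else if ((pvEs patterns).all fun e => PySem.Str.endswith me e) = true then mb ++ me
              else "*") = mb ++ me := by
            rw [if_neg (by rw [hall]; simp), if_pos halle]
          exact hred.symm
        · rw [loop_fail patterns "" ""]
          · have hred : (if (!((pvBs patterns).all fun b => PySem.Str.startswith mb b)) = true then "*"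
                else if ((pvEs patterns).all fun e => PySem.Str.endswith me e) = true then mb ++ me
                else "*") = "*" := by
              rw [if_neg (by rw [hall]; simp), if_neg halle]
            exact hred.symm
          · rintro ⟨_, _, hchainS⟩
            have hchainEs : pvChainS (pvEs patterns) :=
              fun a ha b hb => hchainS a (by simp [ha]) b (by simp [hb])
            have hsall := chainS_all_suf_max hchainEs hme
            refine halle (List.all_eq_true.mpr fun e he => ?_)
            simpa using (endswith_iff_pvSuf me e).mpr (hsall e he)
    · rw [loop_fail patterns "" ""]
      · have hfalse : ((pvBs patterns).all (fun b => PySem.Str.startswith mb b)) = false := by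
          revert hall
          cases ((pvBs patterns).all (fun b => PySem.Str.startswith mb b)) <;> simp
        have hred : (if (!((pvBs patterns).all fun b => PySem.Str.startswith mb b)) = true then "*"
            else
              match PySem.List.max? (pvEs patterns) PySem.Str.len with
              | none => "*"
              | some max_e =>
                if ((pvEs patterns).all fun e => PySem.Str.endswith max_e e) = true then mb ++ max_e
                else "*") = "*" := by
          rw [if_pos (by rw [hfalse]; rfl)]
        exact hred.symm
      · rintro ⟨_, hchainP, _⟩
        have hchainBs : pvChainP (pvBs patterns) :=
          fun a ha b hb => hchainP a (by simp [ha]) b (by simp [hb])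
        have hpall := chainP_all_pre_max hchainBs hmb
        refine hall (List.all_eq_true.mpr fun b hb => ?_)
        simpa using (startswith_iff_pvPre mb b).mpr (hpall b hb)

-- A's first branch reads every pattern as ("", p[1:])
theorem pvTwo_of_star_prefix {p : String}
    (hc : PySem.Str.count p "*" = 1) (hs : PySem.Str.startswith p "*" = true) :
    pvTwo p = some ("", PySem.Str.slice p (some 1) none) := by
  have hpre : ['*'] <+: p.toList := by
    rw [PySem.Str.startswith_eq] at hs
    exact (PySem.Chars.startswith_iff _ _).mp hs
  obtain ⟨t, ht⟩ := hpre
  rw [count_toList] at hc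
  have htc : t.count '*' = 0 := by
    rw [← ht] at hc
    simp at hc
    omega
  have hsp : pvSplit t = [t] := by
    have hlen : (pvSplit t).length = 1 := by rw [length_pvSplit, htc]
    rcases hq : pvSplit t with _ | ⟨a, _ | ⟨a2, t2⟩⟩
    · exact absurd hq (pvSplit_ne_nil t)
    · rw [pvSplit_single hq]
    · rw [hq] at hlen; simp at hlen
  have hparts : (PySem.Str.split? p "*").getD [] = ["", String.ofList t] := by
    rw [parts_eq, ← ht]
    simp [pvSplit, hsp]
  rw [(pvTwo_eq_some_iff p _ _)]
  rw [hparts]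
  have hslice : PySem.Str.slice p (some 1) none = String.ofList t := by
    rw [PySem.Str.slice]
    congr 1
    rw [PySem.Chars.slice_eq_listSlice, PySem.List.slice_from_one, ← ht]
    rfl
  rw [hslice]

-- ===== VERDICT (by name: the statement is the Claim_ definition above) =====
theorem min_word_spec : Claim_equal_min_word := by
  intro patterns _ hne
  unfold Spec_min_word min_word min_word_alt
  by_cases hcnt : patterns.all (fun p => PySem.Str.count p "*" == 1) = true
  · have hok : pvOk patterns := by
      intro p hp h
      have := (pvTwo_eq_none_iff p).mp h
      exact this (by simpa using (List.all_eq_true.mp hcnt) p hp)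
    rw [loop_general patterns hne hok]
    rw [if_pos hcnt]
    by_cases hstar : patterns.all (fun p => PySem.Str.startswith p "*") = true
    · rw [if_pos hstar]
      have hcol : ∀ p ∈ patterns, pvTwo p = some ("", PySem.Str.slice p (some 1) none) := by
        intro p hp
        exact pvTwo_of_star_prefix (by simpa using (List.all_eq_true.mp hcnt) p hp)
          ((List.all_eq_true.mp hstar) p hp)
      have hBseq : pvBs patterns = patterns.map (fun _ => "") := by
        unfold pvBs
        exact List.map_congr_left fun p hp => by rw [hcol p hp]; rfl
      have hEseq : pvEs patterns = patterns.map (fun p => PySem.Str.slice p (some 1) none) := by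
        unfold pvEs
        exact List.map_congr_left fun p hp => by rw [hcol p hp]; rfl
      have hmbnil : PySem.List.max? (pvBs patterns) PySem.Str.len = some "" := by
        apply max?_of_pvMaxP
        constructor
        · rw [hBseq]
          cases patterns with
          | nil => exact absurd rfl hne
          | cons q qs => simp
        · intro a ha
          rw [hBseq] at ha
          simp at ha
          rcases ha with ⟨-, rfl⟩
          exact List.nil_prefix
      have hallnil : ((pvBs patterns).all (fun b => PySem.Str.startswith "" b)) = true := by
        refine List.all_eq_true.mpr fun b hb => ?_
        rw [hBseq] at hb
        simp at hb
        rcases hb with ⟨-, rfl⟩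
        decide
      simp only [hmbnil, hallnil, Bool.not_true, Bool.false_eq_true, if_false]
      rw [hEseq]
      cases hme : PySem.List.max? (patterns.map (fun p => PySem.Str.slice p (some 1) none)) PySem.Str.len with
      | none => rfl
      | some longuest =>
        split
        · rename_i hend
          simp
        · rename_i hend
          rfl
    · rw [if_neg hstar]
      have hBseqA : (patterns.map (fun p => ((PySem.Str.split? p "*").getD []))).map (fun q => q.getD 0 "")
          = pvBs patterns := by
        rw [List.map_map]
        unfold pvBs
        refine List.map_congr_left fun p hp => ?_
        obtain ⟨⟨b, e⟩, hpe⟩ := Option.ne_none_iff_exists'.mp (hok p hp)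
        simp [Function.comp, (pvTwo_eq_some_iff p b e).mp hpe, hpe]
      have hEseqA : (patterns.map (fun p => ((PySem.Str.split? p "*").getD []))).map (fun q => q.getD 1 "")
          = pvEs patterns := by
        rw [List.map_map]
        unfold pvEs
        refine List.map_congr_left fun p hp => ?_
        obtain ⟨⟨b, e⟩, hpe⟩ := Option.ne_none_iff_exists'.mp (hok p hp)
        simp [Function.comp, (pvTwo_eq_some_iff p b e).mp hpe, hpe]
      simp only [hBseqA, hEseqA]
  · rw [if_neg hcnt]
    rw [loop_fail patterns "" ""]
    rintro ⟨hok, _, _⟩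
    refine hcnt (List.all_eq_true.mpr fun p hp => ?_)
    have := hok p hp
    rw [Ne, pvTwo_eq_none_iff, not_not] at this
    simpa using this
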